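-- pv_equiv track=rewrite | github.com/maxwell142857/algo-python | contest/contest393/q4.py | minimumValueSum
-- ===== SOURCE A (Python) =====
-- from typing import List
--
-- def minimumValueSum(nums: List[int], andValues: List[int]) -> int:
--     n = len(nums)
--     m = len(andValues)
--
--     #  pre calculate and value from index i to j and store it into pre[i][j]
--     pre = [[0]*n for _ in range(n)]
--     for i in range(n):
--         pre[i][i] = nums[0]
--         for bias in range(n):
--             if i+bias>=n:
--                 break
--             pre[i][i+bias] = pre[i][i+bias]&pre[i][i+bias-1]
--
--
--     dp = [[-1]*m for _ in range(n)]
--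
--     if nums[0] == andValues[0]:
--         dp[0][0] = nums[0]
--
--     andVal = nums[0]
--     for i in range(1,n):
--         andVal &= nums[i]
--         if andVal == andValues[0]:
--             dp[i][0] = nums[i]
--
--     for p2 in range(1,m):
--         for p1 in range(n):
--             result = float('inf')
--             if p1 < p2:
--                 continue
--             andVal = nums[p1]
--             if andVal == andValues[p2] and dp[p1-1][p2-1] != -1:
--                 result = dp[p1-1][p2-1]+nums[p1]
--
--             bias = 1
--             while p1-bias-1>=0:
--                 andVal &= nums[p1-bias]
--                 if andVal == andValues[p2] and dp[p1-bias-1][p2-1] != -1: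
--                     result = min(result,dp[p1-bias-1][p2-1]+nums[p1])
--                 bias += 1
--             if result != float('inf'):
--                 dp[p1][p2] = result
--
--     return dp[n-1][m-1]
-- ===== SOURCE B (Python) =====
-- from typing import List
--
-- def _step(x, runs):
--     # AND every run's value with x, merging with the adjacent (next-larger-j) run when values collide.
--     if not runs:
--         return []
--     (a, b) = runs[0]
--     rest = _step(x, runs[1:])
--     a &= x
--     if rest and rest[0][0] == a:
--         return [(a, min(b, rest[0][1]))] + rest[1:]
--     return [(a, b)] + rest
--
-- def minimumValueSum(nums: List[int], andValues: List[int]) -> int: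
--     # Layered DP; for each right endpoint keep the O(log maxVal) distinct suffix-AND
--     # values as runs (j-descending) with the min reachable dp_prev[j-1] per run.
--     INF = float('inf')
--     dp = []
--     acc = -1
--     for x in nums:
--         acc &= x
--         dp.append(x if acc == andValues[0] else -1)
--     for p2 in range(1, len(andValues)):
--         t = andValues[p2]
--         ndp = []
--         runs = []
--         for i, x in enumerate(nums):
--             runs = _step(x, runs)
--             pb = dp[i - 1] if i >= 1 and dp[i - 1] != -1 else INF
--             if runs and runs[0][0] == x:
--                 runs = [(x, min(pb, runs[0][1]))] + runs[1:]
--             else: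
--                 runs = [(x, pb)] + runs
--             best = INF
--             for av, b in runs:
--                 if av == t and b < best:
--                     best = b
--             ndp.append(best + x if best != INF else -1)
--         dp = ndp
--     return dp[-1]
-- ===== Notes on version B (the rewrite author's own statement) =====
-- stated objective: faster
-- what changed: Replaces A's quadratic inner scan over all split points for every cell by a layered DP that maintains, per right endpoint, the O(log maxVal) runs of distinct suffix-AND values together with the minimum reachable previous-layer dp value per run; A's -1 'unreachable' sentinel convention is kept.
import Mathlib
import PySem

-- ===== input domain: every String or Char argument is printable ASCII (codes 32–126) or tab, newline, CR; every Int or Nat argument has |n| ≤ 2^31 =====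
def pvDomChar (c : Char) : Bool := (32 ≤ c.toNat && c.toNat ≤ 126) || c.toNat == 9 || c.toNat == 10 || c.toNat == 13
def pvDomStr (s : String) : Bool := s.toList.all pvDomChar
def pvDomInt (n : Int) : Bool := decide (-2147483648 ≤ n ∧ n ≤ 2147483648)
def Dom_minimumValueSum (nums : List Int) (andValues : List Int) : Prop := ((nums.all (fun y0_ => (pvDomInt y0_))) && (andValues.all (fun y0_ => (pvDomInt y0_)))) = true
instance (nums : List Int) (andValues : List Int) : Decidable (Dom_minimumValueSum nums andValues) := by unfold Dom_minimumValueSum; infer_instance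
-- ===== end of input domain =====

-- B replaces A's quadratic per-cell scan over all split points by maintaining, per right
-- endpoint, the runs of distinct suffix-AND values with the min reachable dp per run (faster).

-- `omin a b` : minimum of two "int or +inf" values (`none` = Python's float('inf') sentinel).
-- Shared by both ports: both express Python's `min` with an inf as this operation.
def omin : Option Int → Option Int → Option Int
  | none, b => b
  | a, none => a
  | some a, some b => some (min a b)

-- ===== PORT A =====
-- A's (unused) `pre` table, built exactly as the Python builds it (the bias loop breaks at i+bias>=n;
-- the index i+bias-1 is -1 for i=bias=0, a Python wraparound, hence pyGetD).
def aPre (nums : List Int) : List (List Int) :=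
  let n := nums.length
  (List.range n).map (fun i =>
    let row0 := (List.replicate n (0 : Int)).set i (nums.getD 0 0)
    (List.range (n - i)).foldl (fun row bias =>
      row.set (i + bias)
        (PySem.Int.band (row.getD (i + bias) 0) (PySem.List.pyGetD row ((i : Int) + (bias : Int) - 1) 0)))
      row0)

-- first dp column: dp[i][0] = nums[i] when nums[0]&..&nums[i] == andValues[0], else -1
def aRow0 (nums : List Int) (t0 : Int) : List Int :=
  ((List.range (nums.length - 1)).foldl
    (fun (st : List Int × Int) k =>
      let xi := nums.getD (k + 1) 0
      let av := PySem.Int.band st.2 xi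
      (st.1 ++ [if av = t0 then xi else -1], av))
    ([if nums.getD 0 0 = t0 then nums.getD 0 0 else -1], nums.getD 0 0)).1

-- A's inner while loop for cell (p1,p2): j = p1-bias runs from p1 down to 1, andVal = nums[j]&..&nums[p1];
-- `none` plays float('inf'), the candidate test and min are as in the Python.
def aCell (nums prev : List Int) (t : Int) (p1 : Nat) : Int :=
  let x := nums.getD p1 0
  let base : Option Int :=
    if x = t ∧ prev.getD (p1 - 1) 0 ≠ -1 then some (prev.getD (p1 - 1) 0 + x) else none
  let r := (List.range (p1 - 1)).foldl
    (fun (st : Option Int × Int) b =>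
      let j := p1 - (b + 1)
      let av := PySem.Int.band st.2 (nums.getD j 0)
      (if av = t ∧ prev.getD (j - 1) 0 ≠ -1 then omin st.1 (some (prev.getD (j - 1) 0 + x)) else st.1,
       av))
    (base, x)
  match r.1 with
  | none => -1
  | some v => v

def aLayer (nums prev : List Int) (t : Int) (p2 : Nat) : List Int :=
  (List.range nums.length).map (fun p1 => if p1 < p2 then -1 else aCell nums prev t p1)

def minimumValueSum (nums : List Int) (andValues : List Int) : Int :=
  let n := nums.length
  let pre := aPre nums
  let _ := pre
  let dp0 := aRow0 nums (andValues.getD 0 0)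
  let dpLast := (List.range (andValues.length - 1)).foldl
    (fun prevL k => aLayer nums prevL (andValues.getD (k + 1) 0) (k + 1)) dp0
  dpLast.getD (n - 1) 0

-- ===== PORT B =====
-- Source B's `_step`: AND every run value with x, merging with the adjacent run on collision.
def bStep (x : Int) : List (Int × Option Int) → List (Int × Option Int)
  | [] => []
  | (a, b) :: rs =>
    let rest := bStep x rs
    let a' := PySem.Int.band a x
    match rest with
    | (a2, b2) :: tail => if a2 = a' then (a', omin b b2) :: tail else (a', b) :: rest
    | [] => [(a', b)]

-- Source B's push of the new one-element run (j = i), merging with the front run on collision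
def bPush (x : Int) (pb : Option Int) (rs : List (Int × Option Int)) : List (Int × Option Int) :=
  match rs with
  | (a2, b2) :: tail => if a2 = x then (x, omin pb b2) :: tail else (x, pb) :: rs
  | [] => [(x, pb)]

-- Source B's first dp row (prefix-AND scan); acc starts at -1 (all ones)
def bRow0Body (t0 : Int) (st : List Int × Int) (x : Int) : List Int × Int :=
  let acc := PySem.Int.band st.2 x
  (st.1 ++ [if acc = t0 then x else -1], acc)

def bRow0 (nums : List Int) (t0 : Int) : List Int :=
  (nums.foldl (bRow0Body t0) ([], -1)).1

-- loop body of Source B's `for i, x in enumerate(nums)`: state = (ndp, runs, i); `none` = float('inf')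
def bBody (dp : List Int) (t : Int) (st : List Int × List (Int × Option Int) × Nat) (x : Int) :
    List Int × List (Int × Option Int) × Nat :=
  let i := st.2.2
  let runs1 := bStep x st.2.1
  let pb : Option Int := if 1 ≤ i ∧ dp.getD (i - 1) 0 ≠ -1 then some (dp.getD (i - 1) 0) else none
  let runs2 := bPush x pb runs1
  let best := runs2.foldl (fun acc ab => if ab.1 = t then omin acc ab.2 else acc) none
  let v := match best with
    | none => -1
    | some b => b + x
  (st.1 ++ [v], runs2, i + 1)

def bLayer (nums dp : List Int) (t : Int) : List Int :=
  (nums.foldl (bBody dp t) ([], [], 0)).1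

def minimumValueSum_alt (nums : List Int) (andValues : List Int) : Int :=
  let dp0 := bRow0 nums (andValues.getD 0 0)
  let dpLast := (List.range (andValues.length - 1)).foldl
    (fun dp k => bLayer nums dp (andValues.getD (k + 1) 0)) dp0
  PySem.List.pyGetD dpLast (-1) 0

-- ===== PRECONDITION & SPEC =====
-- A raises IndexError on nums == [] (nums[0]) and on andValues == [] (andValues[0]); nothing else.
def Pre_minimumValueSum (nums : List Int) (andValues : List Int) : Prop :=
  nums ≠ [] ∧ andValues ≠ []
instance (nums : List Int) (andValues : List Int) : Decidable (Pre_minimumValueSum nums andValues) := by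
  unfold Pre_minimumValueSum; infer_instance

def pvWitness_minimumValueSum : List Int × List Int := ([1, 2], [0])

def Spec_minimumValueSum (nums : List Int) (andValues : List Int) (out : Int) : Prop :=
  out = minimumValueSum_alt nums andValues
instance (nums : List Int) (andValues : List Int) (out : Int) :
    Decidable (Spec_minimumValueSum nums andValues out) := by
  unfold Spec_minimumValueSum; infer_instance

-- ===== CLAIM (what is proved, stated in full; the proofs are below) =====
def Claim_equal_minimumValueSum : Prop :=
  ∀ (nums : List Int) (andValues : List Int), Dom_minimumValueSum nums andValues →
    Pre_minimumValueSum nums andValues →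
    Spec_minimumValueSum nums andValues (minimumValueSum nums andValues)

-- ===== LEMMAS AND PROOFS =====

-- ---- bitwise AND: PySem.Int.band is associative ----
theorem pvLorDivTwo (x y : Nat) : (x ||| y) / 2 = x / 2 ||| y / 2 := by
  have h := @Nat.bitwise_div_two_pow or x y 1 rfl
  simpa [HOr.hOr, OrOp.or, Nat.lor] using h

theorem pvLorModTwo (x y : Nat) : (x ||| y) % 2 = 1 ↔ (x % 2 = 1 ∨ y % 2 = 1) := by
  rw [Nat.mod_two_eq_one_iff_testBit_zero, Nat.mod_two_eq_one_iff_testBit_zero,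
      Nat.mod_two_eq_one_iff_testBit_zero, Nat.testBit_lor]
  simp

theorem pvNatAddEqLorOfAndEqZero : ∀ (x y : Nat), x &&& y = 0 → x + y = x ||| y := by
  intro x
  induction x using Nat.strongRecOn with
  | _ x ih =>
    intro y h
    rcases Nat.eq_zero_or_pos x with hx | hx
    · subst hx; simp
    · have hd : x / 2 + y / 2 = x / 2 ||| y / 2 := by
        refine ih (x / 2) (Nat.div_lt_self hx (by norm_num)) (y / 2) ?_
        rw [← Nat.and_div_two, h]
      have hpar : ¬ (x % 2 = 1 ∧ y % 2 = 1) := by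
        intro ⟨h1, h2⟩
        have : (x &&& y) % 2 = 1 := Nat.and_mod_two_eq_one.mpr ⟨h1, h2⟩
        rw [h] at this; omega
      have hvd : (x ||| y) / 2 = x / 2 ||| y / 2 := pvLorDivTwo x y
      have hvm := pvLorModTwo x y
      have e1 : x = 2 * (x / 2) + x % 2 := (Nat.div_add_mod x 2).symm.trans (by ring)
      have e2 : y = 2 * (y / 2) + y % 2 := (Nat.div_add_mod y 2).symm.trans (by ring)
      have e3 : (x ||| y) = 2 * ((x ||| y) / 2) + (x ||| y) % 2 := (Nat.div_add_mod _ 2).symm.trans (by ring)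
      have hx2 := Nat.mod_two_eq_zero_or_one x
      have hy2 := Nat.mod_two_eq_zero_or_one y
      have hv2 := Nat.mod_two_eq_zero_or_one (x ||| y)
      omega

theorem pvNatSubAndEqLdiff (a b : Nat) : a - (a &&& b) = Nat.ldiff a b := by
  have hdis : (a &&& b) &&& Nat.ldiff a b = 0 := by
    apply Nat.eq_of_testBit_eq
    intro k
    simp [Nat.testBit_and, Nat.testBit_ldiff]
    cases a.testBit k <;> cases b.testBit k <;> simp
  have hor : (a &&& b) ||| Nat.ldiff a b = a := by
    apply Nat.eq_of_testBit_eq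
    intro k
    simp [Nat.testBit_and, Nat.testBit_ldiff]
    cases a.testBit k <;> cases b.testBit k <;> simp
  have := pvNatAddEqLorOfAndEqZero (a &&& b) (Nat.ldiff a b) hdis
  omega

theorem pvBandEqLand (a b : Int) : PySem.Int.band a b = Int.land a b := by
  unfold PySem.Int.band Int.land
  rcases a with a | a <;> rcases b with b | b <;> simp [Int.toNat]
  · exact pvNatSubAndEqLdiff a b
  · exact pvNatSubAndEqLdiff b a
  · rw [Int.negSucc_eq]; ring

theorem pvIntTestBitExt : ∀ {a b : Int}, (∀ k, a.testBit k = b.testBit k) → a = b := by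
  have key : ∀ (m n : Nat), ¬ (∀ k, (Int.ofNat m).testBit k = (Int.negSucc n).testBit k) := by
    intro m n h
    have hk : m < 2 ^ (m + n) := lt_of_lt_of_le Nat.lt_two_pow_self (Nat.pow_le_pow_right (by norm_num) (by omega))
    have hk2 : n < 2 ^ (m + n) := lt_of_lt_of_le Nat.lt_two_pow_self (Nat.pow_le_pow_right (by norm_num) (by omega))
    have h1 := h (m + n)
    simp [Int.testBit, Nat.testBit_lt_two_pow hk, Nat.testBit_lt_two_pow hk2] at h1
  intro a b h
  rcases a with a | a <;> rcases b with b | b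
  · have : a = b := Nat.eq_of_testBit_eq (by intro k; simpa [Int.testBit] using h k)
    simp [this]
  · exact absurd h (key a b)
  · exact absurd (fun k => (h k).symm) (key b a)
  · have : a = b := Nat.eq_of_testBit_eq (by intro k; simpa [Int.testBit] using h k)
    simp [this]

theorem pvBandAssoc (a b c : Int) :
    PySem.Int.band (PySem.Int.band a b) c = PySem.Int.band a (PySem.Int.band b c) := by
  rw [pvBandEqLand, pvBandEqLand, pvBandEqLand, pvBandEqLand]
  apply pvIntTestBitExt
  intro k
  simp [Int.testBit_land, Bool.and_assoc]

theorem pvBandNegOneLeft (a : Int) : PySem.Int.band (-1) a = a := by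
  rw [PySem.Int.band_comm]; exact PySem.Int.band_neg_one a

-- ---- omin algebra ----
@[simp] theorem omin_none_left (a : Option Int) : omin none a = a := by cases a <;> rfl
@[simp] theorem omin_none_right (a : Option Int) : omin a none = a := by cases a <;> rfl

theorem omin_comm (a b : Option Int) : omin a b = omin b a := by
  cases a <;> cases b <;> simp [omin, min_comm]

theorem omin_assoc (a b c : Option Int) : omin (omin a b) c = omin a (omin b c) := by
  cases a <;> cases b <;> cases c <;> simp [omin, min_assoc]

theorem omin_rot (a b c : Option Int) : omin a (omin b c) = omin (omin a c) b := by
  rw [omin_comm b c, ← omin_assoc]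

theorem omin_map_add (a b : Option Int) (x : Int) :
    omin (a.map (· + x)) (b.map (· + x)) = (omin a b).map (· + x) := by
  cases a <;> cases b <;> simp [omin, min_add_add_right]

-- ---- segment AND and the layer spec ----
-- seg nums j i = nums[j] & nums[j+1] & … & nums[i]
def seg (nums : List Int) (j i : Nat) : Int :=
  ((List.range' j (i + 1 - j)).map (fun k => nums.getD k 0)).foldl PySem.Int.band (-1)

def seedF (prev : List Int) (j : Nat) : Option Int :=
  if j = 0 then none else if prev.getD (j - 1) 0 = -1 then none else some (prev.getD (j - 1) 0)

def candF (nums prev : List Int) (t : Int) (i j : Nat) : Option Int :=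
  if seg nums j i = t then seedF prev j else none

def osum (g : Nat → Option Int) (l : List Nat) : Option Int :=
  l.foldr (fun j acc => omin (g j) acc) none

def FF (nums prev : List Int) (t : Int) (i : Nat) : Option Int :=
  osum (candF nums prev t i) (List.range (i + 1))

def specCell (nums prev : List Int) (t : Int) (i : Nat) : Int :=
  match FF nums prev t i with
  | none => -1
  | some b => b + nums.getD i 0

def specLayer (nums prev : List Int) (t : Int) : List Int :=
  (List.range nums.length).map (specCell nums prev t)

def spec0 (nums : List Int) (t0 : Int) : List Int :=
  (List.range nums.length).map (fun i => if seg nums 0 i = t0 then nums.getD i 0 else -1)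

theorem seg_self (nums : List Int) (i : Nat) : seg nums i i = nums.getD i 0 := by
  simp [seg, pvBandNegOneLeft]

theorem foldl_band_out (l : List Int) : ∀ (a x : Int),
    l.foldl PySem.Int.band (PySem.Int.band a x) = PySem.Int.band (l.foldl PySem.Int.band a) x := by
  induction l with
  | nil => intro a x; rfl
  | cons y l ih =>
    intro a x
    simp only [List.foldl_cons]
    rw [← ih (PySem.Int.band a y) x]
    congr 1
    rw [pvBandAssoc, pvBandAssoc, PySem.Int.band_comm x y]

theorem seg_left (nums : List Int) {j i : Nat} (h : j < i) :
    seg nums j i = PySem.Int.band (seg nums (j + 1) i) (nums.getD j 0) := by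
  unfold seg
  have h1 : i + 1 - j = (i - j) + 1 := by omega
  have h2 : i + 1 - (j + 1) = i - j := by omega
  rw [h1, h2, List.range'_succ]
  simp only [List.map_cons, List.foldl_cons]
  rw [pvBandNegOneLeft, ← pvBandNegOneLeft (nums.getD j 0), foldl_band_out, pvBandNegOneLeft]

theorem seg_right (nums : List Int) {j i : Nat} (h : j ≤ i) :
    seg nums j (i + 1) = PySem.Int.band (seg nums j i) (nums.getD (i + 1) 0) := by
  unfold seg
  have h1 : i + 1 + 1 - j = (i + 1 - j) + 1 := by omega
  have h2 : j + 1 * (i + 1 - j) = i + 1 := by omega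
  rw [h1, List.range'_concat, h2]
  simp [List.foldl_append]

-- ---- osum lemmas ----
theorem osum_nil (g : Nat → Option Int) : osum g [] = none := rfl

theorem osum_cons (g : Nat → Option Int) (j : Nat) (l : List Nat) :
    osum g (j :: l) = omin (g j) (osum g l) := rfl

theorem osum_append (g : Nat → Option Int) (l1 l2 : List Nat) :
    osum g (l1 ++ l2) = omin (osum g l1) (osum g l2) := by
  induction l1 with
  | nil => simp [osum_nil]
  | cons j l ih => simp only [List.cons_append, osum_cons, ih, omin_assoc]

theorem osum_congr {g h : Nat → Option Int} {l : List Nat} (he : ∀ j ∈ l, g j = h j) :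
    osum g l = osum h l := by
  induction l with
  | nil => rfl
  | cons j l ih =>
    rw [osum_cons, osum_cons, he j (by simp), ih (fun j hj => he j (by simp [hj]))]

theorem osum_none {g : Nat → Option Int} {l : List Nat} (he : ∀ j ∈ l, g j = none) :
    osum g l = none := by
  induction l with
  | nil => rfl
  | cons j l ih => rw [osum_cons, he j (by simp), omin_none_left, ih (fun j hj => he j (by simp [hj]))]

-- ---- A-side: cell and layer characterization ----
theorem aCell_fold (nums prev : List Int) (t : Int) (p1 : Nat) (h1 : 1 ≤ p1) :
    ∀ c, c ≤ p1 - 1 →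
      ((List.range c).foldl
        (fun (st : Option Int × Int) b =>
          let j := p1 - (b + 1)
          let av := PySem.Int.band st.2 (nums.getD j 0)
          (if av = t ∧ prev.getD (j - 1) 0 ≠ -1 then
             omin st.1 (some (prev.getD (j - 1) 0 + nums.getD p1 0)) else st.1,
           av))
        ((if nums.getD p1 0 = t ∧ prev.getD (p1 - 1) 0 ≠ -1 then
            some (prev.getD (p1 - 1) 0 + nums.getD p1 0) else none), nums.getD p1 0))
      = (Option.map (· + nums.getD p1 0)
           (osum (candF nums prev t p1) (p1 :: List.range' (p1 - c) c)),
         seg nums (p1 - c) p1) := by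
  intro c
  induction c with
  | zero =>
    intro _
    simp only [List.range_zero, List.foldl_nil, Nat.sub_zero, List.range'_zero,
      osum_cons, osum_nil, omin_none_right, seg_self, Prod.mk.injEq]
    refine ⟨?_, ?_⟩
    · unfold candF seedF
      rw [seg_self]
      have hnz : ¬ p1 = 0 := by omega
      by_cases hc1 : nums.getD p1 0 = t
      · by_cases hc2 : prev.getD (p1 - 1) 0 = -1
        · rw [if_neg (by tauto), if_pos hc1, if_neg hnz, if_pos hc2]; rfl
        · rw [if_pos ⟨hc1, hc2⟩, if_pos hc1, if_neg hnz, if_neg hc2]; rfl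
      · rw [if_neg (by tauto), if_neg hc1]; rfl
    · trivial
  | succ c ih =>
    intro hc
    have hc' : c ≤ p1 - 1 := by omega
    rw [List.range_succ, List.foldl_append, ih hc', List.foldl_cons, List.foldl_nil]
    have hj : p1 - (c + 1) + 1 = p1 - c := by omega
    have hjlt : p1 - (c + 1) < p1 := by omega
    have hj0 : 1 ≤ p1 - (c + 1) := by omega
    simp only [Prod.mk.injEq]
    refine ⟨?_, ?_⟩
    · show (if PySem.Int.band (seg nums (p1 - c) p1) (nums.getD (p1 - (c + 1)) 0) = t ∧
              prev.getD (p1 - (c + 1) - 1) 0 ≠ -1 then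
            omin (Option.map (· + nums.getD p1 0)
              (osum (candF nums prev t p1) (p1 :: List.range' (p1 - c) c)))
              (some (prev.getD (p1 - (c + 1) - 1) 0 + nums.getD p1 0))
           else Option.map (· + nums.getD p1 0)
              (osum (candF nums prev t p1) (p1 :: List.range' (p1 - c) c)))
          = Option.map (· + nums.getD p1 0)
              (osum (candF nums prev t p1) (p1 :: List.range' (p1 - (c + 1)) (c + 1)))
      have hseg : PySem.Int.band (seg nums (p1 - c) p1) (nums.getD (p1 - (c + 1)) 0)
          = seg nums (p1 - (c + 1)) p1 := by
        rw [← hj]; exact (seg_left nums (by omega)).symm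
      rw [hseg]
      have hrange : List.range' (p1 - (c + 1)) (c + 1)
          = (p1 - (c + 1)) :: List.range' (p1 - c) c := by
        rw [List.range'_succ, hj]
      rw [hrange]
      have hosum : osum (candF nums prev t p1) (p1 :: (p1 - (c + 1)) :: List.range' (p1 - c) c)
          = omin (osum (candF nums prev t p1) (p1 :: List.range' (p1 - c) c))
                 (candF nums prev t p1 (p1 - (c + 1))) := by
        rw [osum_cons, osum_cons, osum_cons, omin_rot]
      rw [hosum]
      have hg : candF nums prev t p1 (p1 - (c + 1))
          = if seg nums (p1 - (c + 1)) p1 = t ∧ prev.getD (p1 - (c + 1) - 1) 0 ≠ -1 then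
              some (prev.getD (p1 - (c + 1) - 1) 0) else none := by
        simp only [candF, seedF]
        have : ¬ p1 - (c + 1) = 0 := by omega
        simp only [this, if_false]
        by_cases hc1 : seg nums (p1 - (c + 1)) p1 = t
        · by_cases hc2 : prev.getD (p1 - (c + 1) - 1) 0 = -1 <;> simp [hc1, hc2]
        · simp [hc1]
      by_cases hcond : seg nums (p1 - (c + 1)) p1 = t ∧ prev.getD (p1 - (c + 1) - 1) 0 ≠ -1
      · rw [if_pos hcond]
        rw [← omin_map_add]
        congr 1
        rw [hg, if_pos hcond]
        rfl
      · rw [if_neg hcond, hg, if_neg hcond, omin_none_right]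
    · show PySem.Int.band (seg nums (p1 - c) p1) (nums.getD (p1 - (c + 1)) 0)
          = seg nums (p1 - (c + 1)) p1
      rw [← hj]; exact (seg_left nums (by omega)).symm

theorem aCell_eq (nums prev : List Int) (t : Int) (p1 : Nat) (h1 : 1 ≤ p1) :
    aCell nums prev t p1 = specCell nums prev t p1 := by
  have hfold := aCell_fold nums prev t p1 h1 (p1 - 1) le_rfl
  have hFF : FF nums prev t p1 = osum (candF nums prev t p1) (p1 :: List.range' 1 (p1 - 1)) := by
    unfold FF
    rw [List.range_eq_range', List.range'_succ]
    rw [osum_cons]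
    have hg0 : candF nums prev t p1 0 = none := by simp [candF, seedF]
    rw [hg0, omin_none_left]
    have h2 : List.range' 1 p1 = List.range' 1 (p1 - 1) ++ [p1] := by
      have h3 : p1 = (p1 - 1) + 1 := by omega
      rw [h3, List.range'_concat]
      simp only [Nat.one_mul]
      congr 2
      omega
    rw [h2, osum_append, omin_comm, osum_cons]
    congr 1
    simp [osum]
  have hp : p1 - (p1 - 1) = 1 := by omega
  rw [hp] at hfold
  unfold aCell specCell
  simp only [hfold, hFF]
  cases osum (candF nums prev t p1) (p1 :: List.range' 1 (p1 - 1)) <;> rfl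

theorem specCell_neg (nums prev : List Int) (t : Int) (i c : Nat) (hi : i < c)
    (hprev : ∀ k, k < c - 1 → k < nums.length → prev.getD k 0 = -1) (hin : i < nums.length) :
    specCell nums prev t i = -1 := by
  have hFF : FF nums prev t i = none := by
    unfold FF
    apply osum_none
    intro j hj
    rw [List.mem_range] at hj
    unfold candF seedF
    rcases Nat.eq_zero_or_pos j with h0 | h0
    · simp [h0]
    · have hnz : ¬ j = 0 := by omega
      have hpr : prev.getD (j - 1) 0 = -1 := hprev (j - 1) (by omega) (by omega)
      rw [List.getD_eq_getElem?_getD] at hpr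
      simp [hnz, hpr]
  unfold specCell
  rw [hFF]

theorem aLayer_eq (nums prev : List Int) (t : Int) (p2 : Nat) (h1 : 1 ≤ p2)
    (hprev : ∀ k, k < p2 - 1 → k < nums.length → prev.getD k 0 = -1) :
    aLayer nums prev t p2 = specLayer nums prev t := by
  unfold aLayer specLayer
  apply List.map_congr_left
  intro p1 hp1
  rw [List.mem_range] at hp1
  by_cases hlt : p1 < p2
  · rw [if_pos hlt, (specCell_neg nums prev t p1 p2 hlt hprev hp1)]
  · rw [if_neg hlt]
    exact aCell_eq nums prev t p1 (by omega)

theorem aRow0_fold (nums : List Int) (t0 : Int) : ∀ c,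
    ((List.range c).foldl
      (fun (st : List Int × Int) k =>
        let xi := nums.getD (k + 1) 0
        let av := PySem.Int.band st.2 xi
        (st.1 ++ [if av = t0 then xi else -1], av))
      ([if nums.getD 0 0 = t0 then nums.getD 0 0 else -1], nums.getD 0 0))
    = ((List.range (c + 1)).map (fun i => if seg nums 0 i = t0 then nums.getD i 0 else -1),
       seg nums 0 c) := by
  intro c
  induction c with
  | zero =>
    norm_num [seg_self]
  | succ c ih =>
    rw [List.range_succ, List.foldl_append, ih, List.foldl_cons, List.foldl_nil]
    have hseg : PySem.Int.band (seg nums 0 c) (nums.getD (c + 1) 0) = seg nums 0 (c + 1) :=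
      (seg_right nums (Nat.zero_le c)).symm
    simp only [Prod.mk.injEq]
    refine ⟨?_, hseg⟩
    rw [hseg, List.range_succ (n := c + 1), List.map_append, List.map_cons, List.map_nil]

theorem aRow0_eq (nums : List Int) (t0 : Int) (h : nums ≠ []) :
    aRow0 nums t0 = spec0 nums t0 := by
  have hn : nums.length - 1 + 1 = nums.length := by
    have : nums.length ≠ 0 := by simpa using h
    omega
  unfold aRow0 spec0
  rw [aRow0_fold, hn]

-- ---- B-side: collect characterization ----
def collect (p : Int → Prop) [DecidablePred p] (rs : List (Int × Option Int)) : Option Int :=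
  rs.foldl (fun acc ab => if p ab.1 then omin acc ab.2 else acc) none

theorem collect_body (p : Int → Prop) [DecidablePred p] (acc : Option Int) (ab : Int × Option Int) :
    (if p ab.1 then omin acc ab.2 else acc) = omin acc (if p ab.1 then ab.2 else none) := by
  by_cases h : p ab.1 <;> simp [h]

theorem collect_go (p : Int → Prop) [DecidablePred p] :
    ∀ (rs : List (Int × Option Int)) (acc : Option Int),
      rs.foldl (fun acc ab => if p ab.1 then omin acc ab.2 else acc) acc = omin acc (collect p rs) := by
  intro rs
  induction rs with
  | nil => intro acc; simp [collect]
  | cons ab rs ih =>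
    intro acc
    rw [List.foldl_cons, ih, collect_body, omin_assoc]
    congr 1
    have hdef : collect p (ab :: rs)
        = rs.foldl (fun acc ab => if p ab.1 then omin acc ab.2 else acc)
            (if p ab.1 then omin none ab.2 else none) := rfl
    rw [hdef, ih, collect_body, omin_none_left]

theorem collect_cons (p : Int → Prop) [DecidablePred p] (a : Int) (b : Option Int)
    (rs : List (Int × Option Int)) :
    collect p ((a, b) :: rs) = omin (if p a then b else none) (collect p rs) := by
  have hdef : collect p ((a, b) :: rs)
      = rs.foldl (fun acc ab => if p ab.1 then omin acc ab.2 else acc)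
          (if p a then omin none b else none) := rfl
  rw [hdef, collect_go]
  congr 2

theorem collect_bPush (p : Int → Prop) [DecidablePred p] (x : Int) (pb : Option Int)
    (rs : List (Int × Option Int)) :
    collect p (bPush x pb rs) = omin (if p x then pb else none) (collect p rs) := by
  unfold bPush
  cases rs with
  | nil => rw [collect_cons]
  | cons ab tail =>
    obtain ⟨a2, b2⟩ := ab
    simp only []
    by_cases heq : a2 = x
    · rw [if_pos heq, collect_cons, collect_cons]
      subst heq
      by_cases hp : p a2 <;> simp [hp, ← omin_assoc]
    · rw [if_neg heq, collect_cons, collect_cons]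

theorem bStep_cons (x a : Int) (b : Option Int) (rs : List (Int × Option Int)) :
    bStep x ((a, b) :: rs) = bPush (PySem.Int.band a x) b (bStep x rs) := rfl

theorem collect_bStep (p : Int → Prop) [DecidablePred p] (x : Int) :
    ∀ rs, collect p (bStep x rs) = collect (fun a => p (PySem.Int.band a x)) rs := by
  intro rs
  induction rs with
  | nil => rfl
  | cons ab rs ih =>
    obtain ⟨a, b⟩ := ab
    rw [bStep_cons, collect_bPush, ih,
      collect_cons (fun a => p (PySem.Int.band a x)) a b rs]

theorem bFold (nums prev : List Int) (t : Int) :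
    ∀ (l : List Int) (i : Nat) (rs : List (Int × Option Int)) (acc : List Int),
      nums.drop i = l → i ≤ nums.length →
      (∀ (p : Int → Prop) (inst : DecidablePred p),
        @collect p inst rs
          = osum (fun j => if p (seg nums j (i - 1)) then seedF prev j else none) (List.range i)) →
      acc = (List.range i).map (specCell nums prev t) →
      (l.foldl (bBody prev t) (acc, rs, i)).1 = (List.range nums.length).map (specCell nums prev t) := by
  intro l
  induction l with
  | nil =>
    intro i rs acc hdrop hile hRI hacc
    have hlen : nums.length ≤ i := by
      have := congrArg List.length hdrop
      simp at this
      omega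
    have hieq : i = nums.length := by omega
    rw [List.foldl_nil]
    rw [hacc, hieq]
  | cons x l' ih =>
    intro i rs acc hdrop hile hRI hacc
    have hget? : nums[i]? = some x := by
      have h0 : (nums.drop i)[0]? = nums[i + 0]? := List.getElem?_drop
      rw [hdrop] at h0
      simpa using h0.symm
    have hilt : i < nums.length := by
      have := List.getElem?_eq_some_iff.mp hget?
      exact this.1
    have hx : nums.getD i 0 = x := by
      rw [List.getD_eq_getElem?_getD, hget?]
      rfl
    have hdrop' : nums.drop (i + 1) = l' := by
      have : nums.drop (i + 1) = List.drop 1 (nums.drop i) := by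
        rw [List.drop_drop, Nat.add_comm]
      rw [this, hdrop]
      rfl
    -- one step of the fold
    rw [List.foldl_cons]
    have hb : bBody prev t (acc, rs, i) x
        = (acc ++ [match @collect (fun a => a = t) (fun a => Int.instDecidableEq a t)
                      (bPush x (if 1 ≤ i ∧ prev.getD (i - 1) 0 ≠ -1
                                then some (prev.getD (i - 1) 0) else none)
                        (bStep x rs)) with
                   | none => -1
                   | some b => b + x],
           bPush x (if 1 ≤ i ∧ prev.getD (i - 1) 0 ≠ -1
                    then some (prev.getD (i - 1) 0) else none) (bStep x rs),
           i + 1) := rfl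
    rw [hb]
    -- the new runs invariant
    have hRI' : ∀ (p : Int → Prop) (inst : DecidablePred p),
        @collect p inst (bPush x (if 1 ≤ i ∧ prev.getD (i - 1) 0 ≠ -1
            then some (prev.getD (i - 1) 0) else none) (bStep x rs))
          = osum (fun j => if p (seg nums j i) then seedF prev j else none) (List.range (i + 1)) := by
      intro p inst
      rw [collect_bPush, collect_bStep, hRI (fun a => p (PySem.Int.band a x)) (fun a => inst _)]
      have hcongr : osum (fun j => if p (PySem.Int.band (seg nums j (i - 1)) x) then seedF prev j else none)
            (List.range i)
          = osum (fun j => if p (seg nums j i) then seedF prev j else none) (List.range i) := by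
        apply osum_congr
        intro j hj
        rw [List.mem_range] at hj
        have hseg : PySem.Int.band (seg nums j (i - 1)) x = seg nums j i := by
          rw [← hx]
          have h1 : (i - 1) + 1 = i := by omega
          have h2 : j ≤ i - 1 := by omega
          rw [← h1]
          exact (seg_right nums h2).symm
        rw [hseg]
      rw [hcongr]
      have hlast : (if p x then (if 1 ≤ i ∧ prev.getD (i - 1) 0 ≠ -1
            then some (prev.getD (i - 1) 0) else none) else none)
          = (if p (seg nums i i) then seedF prev i else none) := by
        rw [seg_self, hx]
        unfold seedF
        by_cases hp : p x
        · rw [if_pos hp, if_pos hp]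
          by_cases h0 : i = 0
          · rw [if_pos h0, if_neg (by omega)]
          · rw [if_neg h0]
            by_cases hm : prev.getD (i - 1) 0 = -1
            · rw [if_neg (by tauto), if_pos hm]
            · rw [if_pos (by exact ⟨by omega, hm⟩), if_neg hm]
        · rw [if_neg hp, if_neg hp]
      rw [hlast]
      rw [List.range_succ, osum_append, omin_comm]
      congr 1
      rw [osum_cons, osum_nil, omin_none_right]
    -- the new cell value is specCell i
    have hv : (match @collect (fun a => a = t) (fun a => Int.instDecidableEq a t)
          (bPush x (if 1 ≤ i ∧ prev.getD (i - 1) 0 ≠ -1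
                    then some (prev.getD (i - 1) 0) else none) (bStep x rs)) with
        | none => -1
        | some b => b + x)
        = specCell nums prev t i := by
      rw [hRI' (fun a => a = t) (fun a => Int.instDecidableEq a t)]
      unfold specCell FF
      have hcand : (fun j => if (seg nums j i) = t then seedF prev j else none)
          = candF nums prev t i := rfl
      rw [hcand, ← hx]
    rw [hv]
    -- recurse
    apply ih (i + 1) _ _ hdrop' (by omega)
    · intro p inst
      have h1 : i + 1 - 1 = i := by omega
      rw [h1]
      exact hRI' p inst
    · rw [hacc, List.range_succ, List.map_append]
      rfl

theorem bLayer_eq (nums prev : List Int) (t : Int) :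
    bLayer nums prev t = specLayer nums prev t := by
  unfold bLayer specLayer
  exact bFold nums prev t nums 0 [] [] rfl (Nat.zero_le _) (fun p inst => rfl) rfl

theorem bRow0_fold (nums : List Int) (t0 : Int) :
    ∀ (l : List Int) (i : Nat) (acc : List Int),
      nums.drop i = l → 1 ≤ i → i ≤ nums.length →
      acc = (List.range i).map (fun k => if seg nums 0 k = t0 then nums.getD k 0 else -1) →
      ((l.foldl (bRow0Body t0) (acc, seg nums 0 (i - 1))).1
       = (List.range nums.length).map (fun k => if seg nums 0 k = t0 then nums.getD k 0 else -1)) := by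
  intro l
  induction l with
  | nil =>
    intro i acc hdrop h1 hile hacc
    have hlen : nums.length ≤ i := by
      have := congrArg List.length hdrop
      simp at this
      omega
    have hieq : i = nums.length := by omega
    rw [List.foldl_nil, hacc, hieq]
  | cons x l' ih =>
    intro i acc hdrop h1 hile hacc
    have hget? : nums[i]? = some x := by
      have h0 : (nums.drop i)[0]? = nums[i + 0]? := List.getElem?_drop
      rw [hdrop] at h0
      simpa using h0.symm
    have hilt : i < nums.length := (List.getElem?_eq_some_iff.mp hget?).1
    have hx : nums.getD i 0 = x := by
      rw [List.getD_eq_getElem?_getD, hget?]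
      rfl
    have hdrop' : nums.drop (i + 1) = l' := by
      have : nums.drop (i + 1) = List.drop 1 (nums.drop i) := by
        rw [List.drop_drop, Nat.add_comm]
      rw [this, hdrop]
      rfl
    rw [List.foldl_cons]
    have hseg : PySem.Int.band (seg nums 0 (i - 1)) x = seg nums 0 i := by
      rw [← hx]
      have hh : (i - 1) + 1 = i := by omega
      rw [← hh]
      exact (seg_right nums (Nat.zero_le _)).symm
    have hb : bRow0Body t0 (acc, seg nums 0 (i - 1)) x
        = (acc ++ [if seg nums 0 i = t0 then x else -1], seg nums 0 i) := by
      unfold bRow0Body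
      simp only [hseg]
    rw [hb]
    have hs : seg nums 0 i = seg nums 0 ((i + 1) - 1) := by norm_num
    rw [hs]
    apply ih (i + 1) _ hdrop' (by omega) (by omega)
    rw [hacc, List.range_succ, List.map_append, ← hx]
    rfl

theorem bRow0_eq (nums : List Int) (t0 : Int) : bRow0 nums t0 = spec0 nums t0 := by
  cases nums with
  | nil => rfl
  | cons y l =>
    unfold bRow0 spec0
    rw [List.foldl_cons]
    have hb : bRow0Body t0 (([] : List Int), (-1 : Int)) y
        = (([] : List Int) ++ [if seg (y :: l) 0 0 = t0 then (y :: l).getD 0 0 else -1],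
           seg (y :: l) 0 ((1 : Nat) - 1)) := by
      unfold bRow0Body
      simp only [seg_self, pvBandNegOneLeft]
      rfl
    rw [hb]
    have := bRow0_fold (y :: l) t0 l 1
      ([] ++ [if seg (y :: l) 0 0 = t0 then (y :: l).getD 0 0 else -1])
      rfl (le_refl 1) (by simp)
      (by simp)
    exact this

-- ---- spec-side facts ----
theorem spec0_length (nums : List Int) (t0 : Int) : (spec0 nums t0).length = nums.length := by
  simp [spec0]

theorem specLayer_length (nums prev : List Int) (t : Int) :
    (specLayer nums prev t).length = nums.length := by
  simp [specLayer]

theorem specLayer_getD (nums prev : List Int) (t : Int) (i : Nat) (hi : i < nums.length) :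
    (specLayer nums prev t).getD i 0 = specCell nums prev t i := by
  unfold specLayer
  rw [PySem.List.getD_map_range _ _ _ _ hi]

-- ---- layer chaining ----
theorem layers_eq (nums andValues : List Int) (hn : nums ≠ []) : ∀ (c : Nat),
    ((List.range c).foldl
      (fun prevL k => aLayer nums prevL (andValues.getD (k + 1) 0) (k + 1))
      (aRow0 nums (andValues.getD 0 0)))
    = ((List.range c).foldl
      (fun dp k => bLayer nums dp (andValues.getD (k + 1) 0))
      (bRow0 nums (andValues.getD 0 0)))
    ∧ ((List.range c).foldl
      (fun prevL k => aLayer nums prevL (andValues.getD (k + 1) 0) (k + 1))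
      (aRow0 nums (andValues.getD 0 0))).length = nums.length
    ∧ (∀ i, i < c → i < nums.length →
        ((List.range c).foldl
          (fun prevL k => aLayer nums prevL (andValues.getD (k + 1) 0) (k + 1))
          (aRow0 nums (andValues.getD 0 0))).getD i 0 = -1) := by
  intro c
  induction c with
  | zero =>
    refine ⟨?_, ?_, ?_⟩
    · simp only [List.range_zero, List.foldl_nil]
      rw [aRow0_eq nums _ hn, bRow0_eq]
    · simp only [List.range_zero, List.foldl_nil]
      rw [aRow0_eq nums _ hn, spec0_length]
    · intro i hi
      omega
  | succ c ih =>
    obtain ⟨heq, hlen, hneg⟩ := ih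
    simp only [List.range_succ, List.foldl_append, List.foldl_cons, List.foldl_nil]
    have hA : aLayer nums
          ((List.range c).foldl
            (fun prevL k => aLayer nums prevL (andValues.getD (k + 1) 0) (k + 1))
            (aRow0 nums (andValues.getD 0 0)))
          (andValues.getD (c + 1) 0) (c + 1)
        = specLayer nums
            ((List.range c).foldl
              (fun prevL k => aLayer nums prevL (andValues.getD (k + 1) 0) (k + 1))
              (aRow0 nums (andValues.getD 0 0)))
            (andValues.getD (c + 1) 0) := by
      apply aLayer_eq _ _ _ _ (by omega)
      intro k hk hk2
      exact hneg k (by omega) hk2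
    refine ⟨?_, ?_, ?_⟩
    · rw [hA, bLayer_eq, heq]
    · rw [hA, specLayer_length]
    · intro i hi hin
      rw [hA, specLayer_getD _ _ _ _ hin]
      apply specCell_neg _ _ _ _ (c + 1) hi _ hin
      intro k hk hk2
      exact hneg k (by omega) hk2

-- ===== VERDICT (by name: the statement is the Claim_ definition above) =====
theorem minimumValueSum_spec : Claim_equal_minimumValueSum := by
  unfold Claim_equal_minimumValueSum
  intro nums andValues _ hpre
  obtain ⟨hn, ha⟩ := hpre
  unfold Spec_minimumValueSum minimumValueSum minimumValueSum_alt
  show ((List.range (andValues.length - 1)).foldl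
      (fun prevL k => aLayer nums prevL (andValues.getD (k + 1) 0) (k + 1))
      (aRow0 nums (andValues.getD 0 0))).getD (nums.length - 1) 0
    = PySem.List.pyGetD ((List.range (andValues.length - 1)).foldl
        (fun dp k => bLayer nums dp (andValues.getD (k + 1) 0))
        (bRow0 nums (andValues.getD 0 0))) (-1) 0
  obtain ⟨heq, hlen, _⟩ := layers_eq nums andValues hn (andValues.length - 1)
  rw [← heq]
  have hne : ((List.range (andValues.length - 1)).foldl
      (fun prevL k => aLayer nums prevL (andValues.getD (k + 1) 0) (k + 1))
      (aRow0 nums (andValues.getD 0 0))) ≠ [] := by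
    intro hcon
    rw [hcon] at hlen
    simp at hlen
    exact hn (List.eq_nil_of_length_eq_zero hlen.symm)
  rw [PySem.List.pyGetD_neg_one _ _ hne, List.getLast_eq_getElem]
  simp only [hlen]
  rw [List.getD_eq_getElem?_getD, List.getElem?_eq_getElem (by
    rw [hlen]
    have : nums.length ≠ 0 := by simpa using hn
    omega)]
  rfl
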